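-- pv_equiv track=rewrite | github.com/arsbw2802/Multimodal_Prediction | TDOST/TDOST/generate_embeddings_v1.py | get_milan_sensor_global_context
-- ===== SOURCE A (Python) =====
-- def get_milan_sensor_global_context(raw_sensor):
--     sensor_mapping = {
--         ("M001",): "at home entrance",
--         ("M002",): "between home entrance and living room",
--         ("M003",): "in dining room",
--         ("M004", "M005"): "in living room",
--         ("M006",): "between living room and workspace / TV room",
--         ("M007", "M008"): "in workspace / TV room",
--         ("M009",): "in aisle",
--         ("M010",): "in aisle between dining area and kitchen",
--         ("M011",): "in aisle between kitchen and bathroom sink",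
--         ("M012",): "between dining area and kitchen",
--         ("M013",): "in bathroom",
--         ("M014", "M015", "M016", "M022", "M023", "T001", "D003"): "in kitchen",
--         ("M017",): "in bathroom sink",
--         ("M018",): "in toilet / shower",
--         ("M019",): "in aisle near workspace / TV room",
--         ("M020", "M021", "M028"): "in bedroom",
--         ("M024",): "in guest bedroom",
--         ("M025",): "in walk-in closet",
--         ("M026",): "in workspace / TV room",
--         ("M027",): "in living room",
--         ("T002",): "between aisle and bathroom sink",
--         ("D001",): "on home entrance door",
--         ("D002",): "near home entrance door"
--     }
--
--     for sensor_codes, context in sensor_mapping.items():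
--         if raw_sensor in sensor_codes:
--             return context
--
--     return None  # Or a default value if the sensor is not found
-- ===== SOURCE B (Python) =====
-- # Binary search over a flat, code-sorted table instead of a linear scan of tuple groups.
-- _SENSOR_CONTEXTS = [
--     ("D001", "on home entrance door"),
--     ("D002", "near home entrance door"),
--     ("D003", "in kitchen"),
--     ("M001", "at home entrance"),
--     ("M002", "between home entrance and living room"),
--     ("M003", "in dining room"),
--     ("M004", "in living room"),
--     ("M005", "in living room"),
--     ("M006", "between living room and workspace / TV room"),
--     ("M007", "in workspace / TV room"),
--     ("M008", "in workspace / TV room"),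
--     ("M009", "in aisle"),
--     ("M010", "in aisle between dining area and kitchen"),
--     ("M011", "in aisle between kitchen and bathroom sink"),
--     ("M012", "between dining area and kitchen"),
--     ("M013", "in bathroom"),
--     ("M014", "in kitchen"),
--     ("M015", "in kitchen"),
--     ("M016", "in kitchen"),
--     ("M017", "in bathroom sink"),
--     ("M018", "in toilet / shower"),
--     ("M019", "in aisle near workspace / TV room"),
--     ("M020", "in bedroom"),
--     ("M021", "in bedroom"),
--     ("M022", "in kitchen"),
--     ("M023", "in kitchen"),
--     ("M024", "in guest bedroom"),
--     ("M025", "in walk-in closet"),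
--     ("M026", "in workspace / TV room"),
--     ("M027", "in living room"),
--     ("M028", "in bedroom"),
--     ("T001", "in kitchen"),
--     ("T002", "between aisle and bathroom sink"),
-- ]
--
-- def get_milan_sensor_global_context(raw_sensor):
--     lo, hi = 0, len(_SENSOR_CONTEXTS)
--     while lo < hi:
--         mid = (lo + hi) // 2
--         code, context = _SENSOR_CONTEXTS[mid]
--         if code == raw_sensor:
--             return context
--         if code < raw_sensor:
--             lo = mid + 1
--         else:
--             hi = mid
--     return None
-- ===== Notes on version B (the rewrite author's own statement) =====
-- stated objective: alternative
-- what changed: Replaced the linear scan over tuple-keyed groups (a membership test per group) by binary search over a single flat, code-sorted (code, context) table.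
import Mathlib
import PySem

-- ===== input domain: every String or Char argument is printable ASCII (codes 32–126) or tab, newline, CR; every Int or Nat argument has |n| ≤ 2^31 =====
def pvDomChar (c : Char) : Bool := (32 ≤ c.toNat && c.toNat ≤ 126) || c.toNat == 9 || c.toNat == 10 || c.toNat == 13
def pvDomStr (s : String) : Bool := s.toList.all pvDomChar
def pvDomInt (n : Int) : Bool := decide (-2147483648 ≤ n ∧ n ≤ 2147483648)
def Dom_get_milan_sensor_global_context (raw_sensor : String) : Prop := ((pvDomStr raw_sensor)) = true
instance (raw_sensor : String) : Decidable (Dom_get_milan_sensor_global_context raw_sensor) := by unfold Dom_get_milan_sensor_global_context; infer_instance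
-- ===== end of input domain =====

-- B replaces A's linear scan of tuple-keyed groups by binary search in a flat code-sorted table (return value only; no side effects).

-- ===== PORT A =====
-- A's dict literal: tuple-keyed groups in insertion order (tuple keys become code lists).
def milanSensorGroups : List (List String × String) := [
  (["M001"], "at home entrance"),
  (["M002"], "between home entrance and living room"),
  (["M003"], "in dining room"),
  (["M004", "M005"], "in living room"),
  (["M006"], "between living room and workspace / TV room"),
  (["M007", "M008"], "in workspace / TV room"),
  (["M009"], "in aisle"),
  (["M010"], "in aisle between dining area and kitchen"),
  (["M011"], "in aisle between kitchen and bathroom sink"),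
  (["M012"], "between dining area and kitchen"),
  (["M013"], "in bathroom"),
  (["M014", "M015", "M016", "M022", "M023", "T001", "D003"], "in kitchen"),
  (["M017"], "in bathroom sink"),
  (["M018"], "in toilet / shower"),
  (["M019"], "in aisle near workspace / TV room"),
  (["M020", "M021", "M028"], "in bedroom"),
  (["M024"], "in guest bedroom"),
  (["M025"], "in walk-in closet"),
  (["M026"], "in workspace / TV room"),
  (["M027"], "in living room"),
  (["T002"], "between aisle and bathroom sink"),
  (["D001"], "on home entrance door"),
  (["D002"], "near home entrance door")
]

-- A's loop: scan the groups in order, return the context of the first group containing raw_sensor.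
def milanScan (raw_sensor : String) : List (List String × String) → Option String
  | [] => none
  | (sensor_codes, context) :: rest =>
      if sensor_codes.contains raw_sensor then some context
      else milanScan raw_sensor rest

def get_milan_sensor_global_context (raw_sensor : String) : Option String :=
  milanScan raw_sensor milanSensorGroups

-- ===== PORT B =====
-- B's module constant: flat (code, context) pairs sorted by code.
def milanSensorTable : List (String × String) := [
  ("D001", "on home entrance door"),
  ("D002", "near home entrance door"),
  ("D003", "in kitchen"),
  ("M001", "at home entrance"),
  ("M002", "between home entrance and living room"),
  ("M003", "in dining room"),
  ("M004", "in living room"),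
  ("M005", "in living room"),
  ("M006", "between living room and workspace / TV room"),
  ("M007", "in workspace / TV room"),
  ("M008", "in workspace / TV room"),
  ("M009", "in aisle"),
  ("M010", "in aisle between dining area and kitchen"),
  ("M011", "in aisle between kitchen and bathroom sink"),
  ("M012", "between dining area and kitchen"),
  ("M013", "in bathroom"),
  ("M014", "in kitchen"),
  ("M015", "in kitchen"),
  ("M016", "in kitchen"),
  ("M017", "in bathroom sink"),
  ("M018", "in toilet / shower"),
  ("M019", "in aisle near workspace / TV room"),
  ("M020", "in bedroom"),
  ("M021", "in bedroom"),
  ("M022", "in kitchen"),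
  ("M023", "in kitchen"),
  ("M024", "in guest bedroom"),
  ("M025", "in walk-in closet"),
  ("M026", "in workspace / TV room"),
  ("M027", "in living room"),
  ("M028", "in bedroom"),
  ("T001", "in kitchen"),
  ("T002", "between aisle and bathroom sink")
]

-- B's while loop: binary search on [lo, hi) over the table; loop variables are
-- nonnegative ints (Nat). The fuel argument only makes the recursion structural
-- (each iteration shrinks hi - lo, which starts ≤ table length = initial fuel).
def milanBSearch (raw_sensor : String) : Nat → Nat → Nat → Option String
  | 0, _, _ => none
  | fuel + 1, lo, hi =>
    if lo < hi then
      -- mid = (lo + hi) // 2 (Python // on nonnegatives = Nat division)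
      match milanSensorTable[(lo + hi) / 2]? with
      | none => none   -- unreachable: mid < hi ≤ table length on every call
      | some (code, context) =>
          if code = raw_sensor then some context
          -- Python's 'code < raw_sensor' is code-point lexicographic: strLt on .toList
          else if PySem.Chars.strLt code.toList raw_sensor.toList then
            milanBSearch raw_sensor fuel ((lo + hi) / 2 + 1) hi
          else milanBSearch raw_sensor fuel lo ((lo + hi) / 2)
    else none

def get_milan_sensor_global_context_alt (raw_sensor : String) : Option String :=
  milanBSearch raw_sensor milanSensorTable.length 0 milanSensorTable.length

-- ===== PRECONDITION & SPEC =====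
def Spec_get_milan_sensor_global_context (raw_sensor : String) (out : Option String) : Prop := out = get_milan_sensor_global_context_alt raw_sensor
instance (raw_sensor : String) (out : Option String) : Decidable (Spec_get_milan_sensor_global_context raw_sensor out) := by unfold Spec_get_milan_sensor_global_context; infer_instance

-- ===== CLAIM =====
def Claim_equal_get_milan_sensor_global_context : Prop := ∀ (raw_sensor : String), Dom_get_milan_sensor_global_context raw_sensor → Spec_get_milan_sensor_global_context raw_sensor (get_milan_sensor_global_context raw_sensor)

-- ===== LEMMAS AND PROOFS =====
-- All 33 sensor codes (the flattened groups = the table's keys).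
def milanCodes : List String := ["D001", "D002", "D003", "M001", "M002", "M003", "M004",
  "M005", "M006", "M007", "M008", "M009", "M010", "M011", "M012", "M013", "M014", "M015",
  "M016", "M017", "M018", "M019", "M020", "M021", "M022", "M023", "M024", "M025", "M026",
  "M027", "M028", "T001", "T002"]

-- If binary search returns a context, the pair (raw_sensor, context) is in the table:
-- the only returning branch is the equality branch, which reads a table entry.
theorem milanBSearch_some_mem (s : String) (fuel lo hi : Nat) (ctx : String)
    (h : milanBSearch s fuel lo hi = some ctx) : (s, ctx) ∈ milanSensorTable := by
  induction fuel generalizing lo hi with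
  | zero => simp [milanBSearch] at h
  | succ fuel ih =>
    rw [milanBSearch] at h
    split at h
    · split at h
      · exact absurd h (by simp)
      · rename_i code context e
        split at h
        · rename_i heq
          obtain rfl : context = ctx := by simpa using h
          subst heq
          exact List.mem_of_getElem? e
        · split at h
          · exact ih _ _ h
          · exact ih _ _ h
    · exact absurd h (by simp)

-- A's scan returns none for a string that is in no group.
theorem milanScan_not_mem (s : String) (h : s ∉ milanCodes) :
    milanScan s milanSensorGroups = none := by
  simp [milanCodes] at h
  obtain ⟨h1, h2, h3, h4, h5, h6, h7, h8, h9, h10, h11, h12, h13, h14, h15, h16, h17,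
    h18, h19, h20, h21, h22, h23, h24, h25, h26, h27, h28, h29, h30, h31, h32, h33⟩ := h
  simp [milanSensorGroups, milanScan, h1, h2, h3, h4, h5, h6, h7, h8, h9, h10, h11, h12,
    h13, h14, h15, h16, h17, h18, h19, h20, h21, h22, h23, h24, h25, h26, h27, h28, h29,
    h30, h31, h32, h33]

-- ===== VERDICT =====
theorem get_milan_sensor_global_context_spec : Claim_equal_get_milan_sensor_global_context := by
  intro s _
  unfold Spec_get_milan_sensor_global_context
  by_cases hs : s ∈ milanCodes
  · fin_cases hs <;> decide
  · unfold get_milan_sensor_global_context get_milan_sensor_global_context_alt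
    rw [milanScan_not_mem s hs]
    cases hb : milanBSearch s milanSensorTable.length 0 milanSensorTable.length with
    | none => rfl
    | some ctx =>
      have hmem : s ∈ milanSensorTable.map Prod.fst :=
        List.mem_map_of_mem (milanBSearch_some_mem s _ _ _ _ hb)
      have : milanSensorTable.map Prod.fst = milanCodes := by decide
      rw [this] at hmem
      exact absurd hmem hs
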